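-- pv_equiv track=rewrite | github.com/dino3111/aulasFP | teste fp apf/APF - Recurso/exercicio3 APF.py | stockholders
-- ===== SOURCE A (Python) =====
-- def stockholders(portfolios):
--     dic = {}
--     for nome, carteira in portfolios.items():
--         for empresa, montante in carteira.items():
--             if empresa not in dic:
--                 dic[empresa] = set()
--                 dic[empresa].add(nome)
--             dic[empresa].add(nome)
--     return dic
-- ===== SOURCE B (Python) =====
-- def stockholders(portfolios):
--     # invert the grouping: first collect every company (first-occurrence order),
--     # then gather each company's holders by scanning the portfolios once per company
--     companies = list(dict.fromkeys(e for c in portfolios.values() for e in c))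
--     return {e: {n for n, c in portfolios.items() if e in c} for e in companies}
-- ===== Notes on version B (the rewrite author's own statement) =====
-- stated objective: alternative
-- what changed: Inverts the single accumulating pass into two steps: first compute the ordered set of all companies, then build the result with one per-company scan of the portfolios gathering its holders.
import Mathlib
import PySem

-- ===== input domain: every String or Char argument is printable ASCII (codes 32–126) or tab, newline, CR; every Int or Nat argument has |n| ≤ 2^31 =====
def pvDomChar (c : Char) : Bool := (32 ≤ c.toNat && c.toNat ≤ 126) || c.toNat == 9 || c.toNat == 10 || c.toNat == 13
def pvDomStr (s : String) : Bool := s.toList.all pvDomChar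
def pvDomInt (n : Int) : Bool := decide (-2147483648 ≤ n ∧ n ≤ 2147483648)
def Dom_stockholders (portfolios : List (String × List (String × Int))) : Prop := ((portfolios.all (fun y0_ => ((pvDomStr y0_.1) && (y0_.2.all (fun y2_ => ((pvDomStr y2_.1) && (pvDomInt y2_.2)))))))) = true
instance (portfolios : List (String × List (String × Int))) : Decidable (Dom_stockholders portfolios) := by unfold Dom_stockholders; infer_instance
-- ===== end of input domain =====

-- B replaces A's single accumulating dict pass by an index-first inversion (all companies first, then one per-company scan); same return value, proved equivalent.


-- ===== PORT A =====
-- body of the inner 'for empresa, montante in carteira.items()' loop of A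
def pvStepA (nome : String) (dic : PySem.Dict String (PySem.Set String)) (em : String × Int) :
    PySem.Dict String (PySem.Set String) :=
  let dic :=
    if dic.contains em.1 then dic
    else
      -- dic[empresa] = set(); dic[empresa].add(nome)
      let dic := dic.insert em.1 (PySem.Set.empty : PySem.Set String)
      dic.modify em.1 PySem.Set.empty (fun s => PySem.Set.add s nome)
  -- dic[empresa].add(nome)
  dic.modify em.1 PySem.Set.empty (fun s => PySem.Set.add s nome)

def stockholders (portfolios : List (String × List (String × Int))) : List (String × List String) :=
  (portfolios.foldl (fun dic nc => nc.2.foldl (pvStepA nc.1) dic) PySem.Dict.empty).items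

-- ===== PORT B =====
-- {n for n, c in portfolios.items() if e in c}
def pvHolders (portfolios : List (String × List (String × Int))) (e : String) : PySem.Set String :=
  PySem.Set.ofList ((portfolios.filter (fun nc => (nc.2.map Prod.fst).contains e)).map Prod.fst)

def stockholders_alt (portfolios : List (String × List (String × Int))) : List (String × List String) :=
  let companies := PySem.List.dedup (portfolios.flatMap (fun nc => nc.2.map Prod.fst))
  companies.map (fun e => (e, pvHolders portfolios e))

-- ===== PRECONDITION & SPEC =====
def Spec_stockholders (portfolios : List (String × List (String × Int))) (out : List (String × List String)) : Prop := out = stockholders_alt portfolios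
instance (portfolios : List (String × List (String × Int))) (out : List (String × List String)) : Decidable (Spec_stockholders portfolios out) := by unfold Spec_stockholders; infer_instance

-- ===== CLAIM (what is proved, stated in full; the proofs are below) =====
def Claim_equal_stockholders : Prop := ∀ (portfolios : List (String × List (String × Int))), Dom_stockholders portfolios → Spec_stockholders portfolios (stockholders portfolios)

-- ===== LEMMAS AND PROOFS =====

theorem pvMapSkip (t : List (String × PySem.Set String)) (e : String)
    (g : (String × PySem.Set String) → (String × PySem.Set String))
    (hnot : ∀ p ∈ t, ¬(p.1 == e) = true)
    (hg : ∀ p, ¬(p.1 == e) = true → g p = p) :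
    t.map g = t := by
  refine (List.map_congr_left ?_).trans (List.map_id t)
  intro p hp
  exact hg p (hnot p hp)

theorem pvMapReplace (l : List (String × PySem.Set String)) (e : String)
    (f : PySem.Set String → PySem.Set String) (hnd : (l.map Prod.fst).Nodup) :
    l.map (fun p => if p.1 == e then (e, f ((Option.map Prod.snd (List.find? (fun p => p.1 == e) l)).getD PySem.Set.empty)) else p)
      = l.map (fun p => if p.1 == e then (p.1, f p.2) else p) := by
  induction l with
  | nil => rfl
  | cons q t ih =>
    simp only [List.map_cons, List.nodup_cons] at hnd
    obtain ⟨hq1, ht⟩ := hnd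
    by_cases hq : (q.1 == e) = true
    · have hqe : q.1 = e := by simpa using hq
      have hnot : ∀ p ∈ t, ¬(p.1 == e) = true := by
        intro p hp hpe
        exact hq1 (List.mem_map.mpr ⟨p, hp, by rw [show p.1 = e by simpa using hpe, hqe]⟩)
      rw [List.map_cons, List.map_cons]
      simp only [List.find?_cons, hq, cond_true, Option.map_some, Option.getD_some, if_pos]
      rw [pvMapSkip t e _ hnot (fun p hp => by simp [hp]),
          pvMapSkip t e _ hnot (fun p hp => by simp [hp]), hqe]
    · rw [List.map_cons, List.map_cons]
      simp only [List.find?_cons, hq, cond_false, Bool.false_eq_true, if_neg, not_false_iff]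
      rw [ih ht]

theorem pvStepA_items (n : String) (d : PySem.Dict String (PySem.Set String)) (e : String) (m : Int)
    (hnd : (d.items.map Prod.fst).Nodup) :
    (pvStepA n d (e, m)).items =
      if d.contains e then
        d.items.map (fun kv => if kv.1 == e then (kv.1, PySem.Set.add kv.2 n) else kv)
      else d.items ++ [(e, PySem.Set.add PySem.Set.empty n)] := by
  by_cases hc : d.contains e = true
  · rw [if_pos hc]
    show ((if d.contains e then d else _).modify e PySem.Set.empty (fun s => PySem.Set.add s n)).items = _
    rw [if_pos hc]
    simp only [PySem.Dict.modify, PySem.Dict.insert, PySem.Dict.getD, PySem.Dict.get?, hc, if_pos]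
    exact pvMapReplace d.items e (fun s => PySem.Set.add s n) hnd
  · rw [if_neg hc]
    have hnone : List.find? (fun p => p.1 == e) d.items = none := by
      rw [List.find?_eq_none]
      intro p hp hpe
      exact hc (by simp only [PySem.Dict.contains, List.any_eq_true]; exact ⟨p, hp, hpe⟩)
    have hnot : ∀ p ∈ d.items, ¬(p.1 == e) = true := by
      rw [List.find?_eq_none] at hnone; exact hnone
    show ((if d.contains e then d else _).modify e PySem.Set.empty (fun s => PySem.Set.add s n)).items = _
    rw [if_neg hc]
    have hins : (d.insert e (PySem.Set.empty : PySem.Set String)).items = d.items ++ [(e, PySem.Set.empty)] := by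
      simp [PySem.Dict.insert, hc]
    have key : ∀ (v : PySem.Set String) (dd : PySem.Dict String (PySem.Set String)),
        dd.items = d.items ++ [(e, v)] →
        (dd.modify e PySem.Set.empty (fun s => PySem.Set.add s n)).items
          = d.items ++ [(e, PySem.Set.add v n)] := by
      intro v dd hdd
      have hcont : dd.contains e = true := by
        simp [PySem.Dict.contains, hdd, List.any_append]
      have hfind : List.find? (fun p => p.1 == e) dd.items = some (e, v) := by
        rw [hdd, List.find?_append, hnone]
        simp
      simp only [PySem.Dict.modify, PySem.Dict.insert, PySem.Dict.getD, PySem.Dict.get?, hcont,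
        if_pos, hfind, Option.map_some, Option.getD_some, hdd, List.map_append]
      congr 1
      · exact pvMapSkip d.items e _ hnot (fun p hp => by simp [hp])
      · simp [hnone]
    have h1 := key PySem.Set.empty (d.insert e PySem.Set.empty) hins
    have h2 := key (PySem.Set.add PySem.Set.empty n) _ h1
    rw [h2]
    have hadd : PySem.Set.add (PySem.Set.add PySem.Set.empty n) n = PySem.Set.add PySem.Set.empty n := by
      simp [PySem.Set.add, PySem.Set.empty, PySem.Set.contains]
    rw [hadd]

theorem pvAdd_idem (s : PySem.Set String) (n : String) :
    PySem.Set.add (PySem.Set.add s n) n = PySem.Set.add s n := by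
  by_cases h : n ∈ s
  · simp [PySem.Set.add, PySem.Set.contains, h]
  · simp [PySem.Set.add, PySem.Set.contains, h]

theorem pvUpdate_eq (xs : List String) (s : PySem.Set String) :
    PySem.Set.update s xs = s ++ (PySem.List.dedup xs).filter (fun x => !s.contains x) := by
  induction xs generalizing s with
  | nil => simp [PySem.Set.update, PySem.List.dedup, PySem.Set.ofList, PySem.Set.empty]
  | cons x l ih =>
    have hded : PySem.List.dedup (x :: l) = [x] ++ (PySem.List.dedup l).filter (fun y => !([x] : PySem.Set String).contains y) := by
      show PySem.Set.ofList (x :: l) = _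
      rw [show PySem.Set.ofList (x :: l) = PySem.Set.update ([x] : PySem.Set String) l by
        simp [PySem.Set.ofList, PySem.Set.update, PySem.Set.add, PySem.Set.empty, PySem.Set.contains]]
      exact ih _
    rw [show PySem.Set.update s (x :: l) = PySem.Set.update (s.add x) l from rfl, ih, hded]
    simp only [PySem.Set.add, PySem.Set.contains, List.filter_append, List.filter_filter]
    by_cases hc : x ∈ s
    · rw [if_pos (by simpa [List.contains_iff_mem] using hc)]
      have h1 : List.filter (fun y => !List.contains s y) [x] = [] := by
        simp [List.contains_iff_mem, hc]
      rw [h1, List.nil_append]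
      congr 1
      apply List.filter_congr
      intro a _
      by_cases hax : a = x
      · subst hax; simp [List.contains_iff_mem, hc]
      · simp [List.contains_iff_mem, hax]
    · rw [if_neg (by simpa [List.contains_iff_mem] using hc)]
      have h1 : List.filter (fun y => !List.contains s y) [x] = [x] := by
        simp [List.contains_iff_mem, hc]
      rw [h1, List.append_assoc]
      congr 2
      apply List.filter_congr
      intro a _
      by_cases hax : a = x
      · subst hax; simp [List.contains_iff_mem, hc]
      · simp [List.contains_iff_mem, hax]

theorem pvDedup_cons (x : String) (l : List String) :
    PySem.List.dedup (x :: l) = x :: (PySem.List.dedup l).filter (fun y => !(y == x)) := by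
  show PySem.Set.ofList (x :: l) = _
  rw [show PySem.Set.ofList (x :: l) = PySem.Set.update ([x] : PySem.Set String) l by
    simp [PySem.Set.ofList, PySem.Set.update, PySem.Set.add, PySem.Set.empty, PySem.Set.contains]]
  rw [pvUpdate_eq]
  simp only [List.singleton_append, List.cons.injEq, true_and]
  apply List.filter_congr
  intro y _
  simp only [PySem.Set.contains, List.contains_cons, List.contains_nil, Bool.or_false]

theorem pvStepA_keys (n : String) (d : PySem.Dict String (PySem.Set String)) (e : String) (m : Int)
    (hnd : (d.items.map Prod.fst).Nodup) :
    (pvStepA n d (e, m)).items.map Prod.fst =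
      if d.contains e then d.items.map Prod.fst else d.items.map Prod.fst ++ [e] := by
  rw [pvStepA_items n d e m hnd]
  by_cases hc : d.contains e = true
  · rw [if_pos hc, if_pos hc, List.map_map]
    apply List.map_congr_left
    intro p _
    by_cases hp : p.1 = e <;> simp [hp]
  · rw [if_neg hc, if_neg hc]
    simp

theorem pvContains_keys (dd : PySem.Dict String (PySem.Set String)) (x : String) :
    dd.contains x = (dd.items.map Prod.fst).any (fun y => y == x) := by
  simp only [PySem.Dict.contains, List.any_map]
  rfl

theorem pvInnerA_items (c : List (String × Int)) (n : String) (d : PySem.Dict String (PySem.Set String))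
    (hnd : (d.items.map Prod.fst).Nodup) :
    (c.foldl (pvStepA n) d).items =
      d.items.map (fun kv => if (c.map Prod.fst).contains kv.1 then (kv.1, PySem.Set.add kv.2 n) else kv)
      ++ ((PySem.List.dedup (c.map Prod.fst)).filter (fun e => !d.contains e)).map
          (fun e => (e, PySem.Set.add PySem.Set.empty n)) := by
  induction c generalizing d with
  | nil =>
    simp [PySem.List.dedup, PySem.Set.ofList, PySem.Set.empty]
  | cons em cs ih =>
    obtain ⟨e, m⟩ := em
    rw [List.foldl_cons]
    have hstep := pvStepA_items n d e m hnd
    have hkeys := pvStepA_keys n d e m hnd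
    simp only [List.map_cons]
    rw [pvDedup_cons, List.filter_cons]
    by_cases hc : d.contains e = true
    · rw [if_pos hc] at hstep hkeys
      have hnd1 : ((pvStepA n d (e, m)).items.map Prod.fst).Nodup := by rw [hkeys]; exact hnd
      have hcont1 : ∀ x, (pvStepA n d (e, m)).contains x = d.contains x := by
        intro x; rw [pvContains_keys, pvContains_keys, hkeys]
      have hne : (!d.contains e) = false := by simp [hc]
      rw [ih _ hnd1, hne]
      simp only [Bool.false_eq_true, if_neg, not_false_iff]
      congr 1
      · rw [hstep, List.map_map]
        apply List.map_congr_left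
        rintro ⟨k, v⟩ _
        simp only [Function.comp_apply]
        by_cases hpe : k = e
        · subst hpe
          split_ifs <;> simp_all [List.contains_cons, pvAdd_idem]
        · split_ifs <;> simp_all [List.contains_cons]
      · rw [List.filter_filter]
        congr 1
        apply List.filter_congr
        intro y _
        rw [hcont1]
        by_cases hye : y = e
        · subst hye; simp [hc]
        · have hb : (y == e) = false := by simpa using hye
          simp [hb]
    · rw [if_neg hc] at hstep hkeys
      have hnot : ∀ p ∈ d.items, ¬(p.1 == e) = true := by
        intro p hp hpe
        exact hc (by simp only [PySem.Dict.contains, List.any_eq_true]; exact ⟨p, hp, hpe⟩)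
      have hnd1 : ((pvStepA n d (e, m)).items.map Prod.fst).Nodup := by
        rw [hkeys]
        refine List.Nodup.append hnd (List.nodup_singleton e) ?_
        intro x hx hx1
        have hxe : x = e := by simpa using hx1
        subst hxe
        refine hc ?_
        rw [pvContains_keys]
        simp only [List.any_eq_true]
        exact ⟨x, hx, by simp⟩
      have hcont1 : ∀ x, (pvStepA n d (e, m)).contains x = (d.contains x || (x == e)) := by
        intro x
        rw [pvContains_keys, pvContains_keys, hkeys]
        simp only [List.any_append, List.any_cons, List.any_nil, Bool.or_false]
        have : (e == x) = (x == e) := by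
          by_cases hx : x = e
          · simp [hx]
          · have h1 : (x == e) = false := by simpa using hx
            have h2 : (e == x) = false := by simpa using fun h => hx h.symm
            rw [h1, h2]
        rw [this]
      have hne : (!d.contains e) = true := by simp [hc]
      rw [ih _ hnd1, hne]
      simp only [if_pos]
      rw [hstep, List.map_append]
      rw [List.append_assoc]
      congr 1
      · apply List.map_congr_left
        rintro ⟨k, v⟩ hp
        have hpe : ¬k = e := by simpa using hnot (k, v) hp
        split_ifs <;> simp_all [List.contains_cons]
      · simp only [List.map_cons, List.map_nil, List.singleton_append]
        congr 1
        · split_ifs <;> simp [pvAdd_idem]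
        · rw [List.filter_filter]
          congr 1
          apply List.filter_congr
          intro y _
          rw [hcont1]
          by_cases hye : y = e
          · subst hye; simp [hc]
          · have hb : (y == e) = false := by simpa using hye
            simp [hb]

theorem pvContains_mem (d : PySem.Dict String (PySem.Set String)) (x : String) :
    d.contains x = true ↔ x ∈ d.items.map Prod.fst := by
  rw [pvContains_keys]
  rw [List.any_eq_true]
  constructor
  · rintro ⟨y, hy, hyx⟩
    rwa [show y = x from by simpa using hyx] at hy
  · intro hx
    exact ⟨x, hx, by simp⟩

theorem pvDedup_append (a b : List String) :
    PySem.List.dedup (a ++ b) = PySem.List.dedup a ++ (PySem.List.dedup b).filter (fun y => !a.contains y) := by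
  show PySem.Set.ofList (a ++ b) = _
  rw [show PySem.Set.ofList (a ++ b) = PySem.Set.update (PySem.Set.ofList a) b from by
    simp [PySem.Set.ofList, PySem.Set.update, List.foldl_append]]
  rw [pvUpdate_eq]
  congr 1
  apply List.filter_congr
  intro y _
  congr 1
  simp only [PySem.Set.contains]
  by_cases hy : y ∈ a
  · have h1 : List.contains a y = true := by simpa [List.contains_iff_mem] using hy
    have h2 : List.contains (PySem.Set.ofList a) y = true := by
      simpa [List.contains_iff_mem, PySem.Set.mem_ofList] using hy
    rw [h1, h2]
  · have h1 : List.contains a y = false := by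
      simpa [List.contains_iff_mem] using hy
    have h2 : List.contains (PySem.Set.ofList a) y = false := by
      simpa [List.contains_iff_mem, PySem.Set.mem_ofList] using hy
    rw [h1, h2]

def pvNames (portfolios : List (String × List (String × Int))) (e : String) : List String :=
  (portfolios.filter (fun nc => (nc.2.map Prod.fst).contains e)).map Prod.fst

theorem pvLoopA_items (ps : List (String × List (String × Int))) (d : PySem.Dict String (PySem.Set String))
    (hnd : (d.items.map Prod.fst).Nodup) :
    (ps.foldl (fun dic nc => nc.2.foldl (pvStepA nc.1) dic) d).items =
      d.items.map (fun kv => (kv.1, PySem.Set.update kv.2 (pvNames ps kv.1)))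
      ++ ((PySem.List.dedup (ps.flatMap (fun nc => nc.2.map Prod.fst))).filter (fun e => !d.contains e)).map
          (fun e => (e, PySem.Set.ofList (pvNames ps e))) := by
  induction ps generalizing d with
  | nil =>
    simp only [List.foldl_nil, List.flatMap_nil]
    rw [show PySem.List.dedup ([] : List String) = [] from rfl]
    simp only [List.filter_nil, List.map_nil, List.append_nil]
    refine ((List.map_congr_left ?_).trans (List.map_id _)).symm
    rintro ⟨k, v⟩ _
    rfl
  | cons p rest ih =>
    obtain ⟨n0, c⟩ := p
    rw [List.foldl_cons]
    have hinner := pvInnerA_items c n0 d hnd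
    have hkeys1 : (c.foldl (pvStepA n0) d).items.map Prod.fst
        = d.items.map Prod.fst ++ ((PySem.List.dedup (c.map Prod.fst)).filter (fun e => !d.contains e)) := by
      rw [hinner, List.map_append, List.map_map, List.map_map]
      congr 1
      · apply List.map_congr_left
        rintro ⟨k, v⟩ _
        simp only [Function.comp_apply]
        by_cases hk : ((c.map Prod.fst).contains k) = true
        · rw [if_pos hk]
        · rw [if_neg hk]
      · exact (List.map_congr_left (fun y _ => rfl)).trans (List.map_id _)
    have hnd1 : ((c.foldl (pvStepA n0) d).items.map Prod.fst).Nodup := by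
      rw [hkeys1]
      refine List.Nodup.append hnd ((PySem.List.nodup_dedup _).filter _) ?_
      intro x hx hx2
      have hxn : (!d.contains x) = true := (List.mem_filter.mp hx2).2
      have : d.contains x = true := (pvContains_mem d x).mpr hx
      simp [this] at hxn
    have hcont1 : ∀ x, (c.foldl (pvStepA n0) d).contains x
        = (d.contains x || (c.map Prod.fst).contains x) := by
      intro x
      by_cases hd : d.contains x = true
      · have : (c.foldl (pvStepA n0) d).contains x = true := by
          rw [pvContains_mem, hkeys1]
          exact List.mem_append_left _ ((pvContains_mem d x).mp hd)
        rw [this, hd]; rfl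
      · by_cases hm : ((c.map Prod.fst).contains x) = true
        · have : (c.foldl (pvStepA n0) d).contains x = true := by
            rw [pvContains_mem, hkeys1]
            refine List.mem_append_right _ (List.mem_filter.mpr ⟨?_, by simp [hd]⟩)
            rw [PySem.List.mem_dedup]
            simpa [List.contains_iff_mem] using hm
          rw [this, hm]
          simp [hd]
        · have : ¬(c.foldl (pvStepA n0) d).contains x = true := by
            rw [pvContains_mem, hkeys1]
            intro hx
            rcases List.mem_append.mp hx with h | h
            · exact hd ((pvContains_mem d x).mpr h)
            · have := List.mem_of_mem_filter h
              rw [PySem.List.mem_dedup] at this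
              exact hm (by simpa [List.contains_iff_mem] using this)
          simp only [Bool.not_eq_true] at this hd hm
          rw [this, hd, hm]
          rfl
    rw [ih _ hnd1, hinner]
    have hnames : ∀ e, pvNames ((n0, c) :: rest) e
        = if ((c.map Prod.fst).contains e) = true then n0 :: pvNames rest e else pvNames rest e := by
      intro e
      simp only [pvNames, List.filter_cons]
      split_ifs with h1 h2 <;> simp_all [List.contains_iff_mem]
    simp only [List.flatMap_cons]
    rw [pvDedup_append, List.filter_append, List.map_append, List.map_append, List.map_map, List.map_map]
    rw [List.append_assoc]
    congr 1
    · -- old entries of d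
      apply List.map_congr_left
      rintro ⟨k, v⟩ _
      simp only [Function.comp_apply]
      rw [hnames k]
      by_cases hk : ((c.map Prod.fst).contains k) = true
      · simp only [hk, if_pos]
        rfl
      · simp only [hk, Bool.false_eq_true, if_neg, not_false_iff]
    · congr 1
      · -- companies first seen in c
        apply List.map_congr_left
        intro e he
        have hce : ((c.map Prod.fst).contains e) = true := by
          have := (List.mem_filter.mp he).1
          rw [PySem.List.mem_dedup] at this
          simpa [List.contains_iff_mem] using this
        simp only [Function.comp_apply]
        rw [hnames e, if_pos hce]
        rfl
      · -- companies first seen later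
        rw [List.filter_filter]
        have : List.filter (fun e => !(c.foldl (pvStepA n0) d).contains e)
              (PySem.List.dedup (rest.flatMap (fun nc => nc.2.map Prod.fst)))
            = List.filter (fun y => !d.contains y && !(c.map Prod.fst).contains y)
              (PySem.List.dedup (rest.flatMap (fun nc => nc.2.map Prod.fst))) := by
          apply List.filter_congr
          intro y _
          rw [hcont1 y]
          by_cases h1 : d.contains y = true <;> by_cases h2 : ((c.map Prod.fst).contains y) = true <;>
            simp [h1, h2]
        rw [this]
        have hfeq : List.filter (fun y => !d.contains y && !(c.map Prod.fst).contains y)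
              (PySem.List.dedup (rest.flatMap (fun nc => nc.2.map Prod.fst)))
            = List.filter (fun a => !(c.map Prod.fst).contains a && !d.contains a)
              (PySem.List.dedup (rest.flatMap (fun nc => nc.2.map Prod.fst))) := by
          apply List.filter_congr
          intro y _
          rw [Bool.and_comm]
        rw [hfeq]
        apply List.map_congr_left
        intro e he
        have hce : ((c.map Prod.fst).contains e) = false := by
          have h2 := (List.mem_filter.mp he).2
          have h3 := ((Bool.and_eq_true _ _).mp h2).1
          simpa using h3
        rw [hnames e, hce]
        simp

-- ===== VERDICT (by name: the statement is the Claim_ definition above) =====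
theorem stockholders_spec : Claim_equal_stockholders := by
  intro ps _
  show stockholders ps = stockholders_alt ps
  have h := pvLoopA_items ps PySem.Dict.empty (by simp [PySem.Dict.empty])
  simp only [stockholders, stockholders_alt, pvHolders] at *
  rw [h]
  simp [PySem.Dict.empty, PySem.Dict.contains, pvNames]
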